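-- pv_equiv track=rewrite | github.com/yanny2five/paperfile-web | modules/clean_database.py | fix_unmatched_parentheses_both_sides
-- ===== SOURCE A (Python) =====
-- def fix_unmatched_parentheses_both_sides(text: str) -> str:
--     """
--     For location and volume:
--     - If there are unmatched ')' before any matching '(',
--       prepend the needed number of '(' at the beginning.
--     - If there are unmatched '(' left at the end,
--       append the needed number of ')' at the end.
--     - This handles both count mismatch and order mismatch.
--     """
--     if not text:
--         return ""
--
--     s = str(text)
--
--     balance = 0
--     missing_left = 0
--
--     for ch in s:
--         if ch == "(":
--             balance += 1
--         elif ch == ")":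
--             if balance > 0:
--                 balance -= 1
--             else:
--                 missing_left += 1
--
--     missing_right = balance
--
--     if missing_left > 0:
--         s = ("(" * missing_left) + s
--     if missing_right > 0:
--         s = s + (")" * missing_right)
--
--     return s
-- ===== SOURCE B (Python) =====
-- def fix_unmatched_parentheses_both_sides(text: str) -> str:
--     # Different algorithm: extract the parenthesis-only core and cancel matched
--     # "()" pairs to a fixed point; the irreducible core is ")"*a + "("*b, so a
--     # '(' must be prepended for each leftover ')' and a ')' appended for each
--     # leftover '('.
--     s = str(text)
--     core = "".join(ch for ch in s if ch in "()")
--     while "()" in core: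
--         core = core.replace("()", "")
--     return "(" * core.count(")") + s + ")" * core.count("(")
-- ===== Notes on version B (the rewrite author's own statement) =====
-- stated objective: alternative
-- what changed: Instead of counting unmatched parentheses with a running balance, B extracts the parenthesis-only core and repeatedly cancels matched "()" pairs to a fixed point; the irreducible core has the shape ')'*a+'('*b, and the two paddings are read off it by counting.
import Mathlib
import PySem

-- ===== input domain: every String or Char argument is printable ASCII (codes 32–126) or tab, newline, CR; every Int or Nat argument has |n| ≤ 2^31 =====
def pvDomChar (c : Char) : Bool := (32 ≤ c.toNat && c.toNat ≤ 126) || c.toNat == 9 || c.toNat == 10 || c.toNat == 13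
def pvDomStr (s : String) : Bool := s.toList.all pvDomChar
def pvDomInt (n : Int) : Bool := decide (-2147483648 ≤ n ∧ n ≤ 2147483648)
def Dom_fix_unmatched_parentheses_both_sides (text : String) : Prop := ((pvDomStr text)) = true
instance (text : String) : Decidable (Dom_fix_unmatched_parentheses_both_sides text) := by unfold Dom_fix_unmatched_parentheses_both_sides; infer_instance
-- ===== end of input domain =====

-- B replaces A's running-balance counting with fixed-point cancellation of "()" pairs on the
-- parenthesis-only core, reading both paddings off the irreducible core (objective: alternative).


-- ===== PORT A =====
-- Loop over the characters with state (balance, missing_left), branch order as in A.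
def pvFoldA : List Char → Int → Int → Int × Int
  | [], balance, missing_left => (balance, missing_left)
  | ch :: t, balance, missing_left =>
    if ch = '(' then pvFoldA t (balance + 1) missing_left
    else if ch = ')' then
      if balance > 0 then pvFoldA t (balance - 1) missing_left
      else pvFoldA t balance (missing_left + 1)
    else pvFoldA t balance missing_left

def fix_unmatched_parentheses_both_sides (text : String) : String :=
  if text = "" then ""
  else
    let s := text.toList
    let st := pvFoldA s 0 0
    let missing_right := st.1
    let missing_left := st.2
    let s := if missing_left > 0 then List.replicate missing_left.toNat '(' ++ s else s
    let s := if missing_right > 0 then s ++ List.replicate missing_right.toNat ')' else s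
    String.ofList s

-- ===== PORT B =====
-- '"()" in core'
def pvHasPair : List Char → Bool
  | [] => false
  | [_] => false
  | c1 :: c2 :: t => (c1 = '(' ∧ c2 = ')' : Bool) || pvHasPair (c2 :: t)

-- core.replace("()", ""): left-to-right non-overlapping removal of the pattern "()"
-- (exact for this two-char pattern with empty replacement).
def pvRemPairs : List Char → List Char
  | [] => []
  | [c] => [c]
  | c1 :: c2 :: t => if c1 = '(' ∧ c2 = ')' then pvRemPairs t else c1 :: pvRemPairs (c2 :: t)

-- termination measure for the while loop (needed by pvReduce's decreasing_by)
theorem pvRemPairs_len_le : ∀ l, (pvRemPairs l).length ≤ l.length := by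
  intro l
  induction l using pvRemPairs.induct with
  | case1 => simp [pvRemPairs]
  | case2 c => simp [pvRemPairs]
  | case3 c1 c2 t hp ih => simp only [pvRemPairs, if_pos hp, List.length_cons]; omega
  | case4 c1 c2 t hp ih =>
    simp only [pvRemPairs, if_neg hp, List.length_cons]
    simp only [List.length_cons] at ih
    omega

theorem pvRemPairs_len_lt : ∀ l, pvHasPair l = true → (pvRemPairs l).length < l.length := by
  intro l h
  induction l using pvRemPairs.induct with
  | case1 => simp [pvHasPair] at h
  | case2 c => simp [pvHasPair] at h
  | case3 c1 c2 t hp ih =>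
    simp only [pvRemPairs, if_pos hp, List.length_cons]
    have := pvRemPairs_len_le t
    omega
  | case4 c1 c2 t hp ih =>
    simp only [pvHasPair] at h
    have h' : pvHasPair (c2 :: t) = true := by
      rcases Bool.or_eq_true_iff.mp h with h1 | h1
      · exact absurd (by simpa using h1) hp
      · exact h1
    simp only [pvRemPairs, if_neg hp, List.length_cons]
    exact Nat.succ_lt_succ (ih h')

-- 'while "()" in core: core = core.replace("()", "")'
def pvReduce (l : List Char) : List Char :=
  if h : pvHasPair l = true then pvReduce (pvRemPairs l) else l
termination_by l.length
decreasing_by exact pvRemPairs_len_lt l h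

def fix_unmatched_parentheses_both_sides_alt (text : String) : String :=
  let s := text.toList
  let core := pvReduce (s.filter (fun c => c = '(' || c = ')'))
  String.ofList (List.replicate (core.count ')') '(' ++ s ++ List.replicate (core.count '(') ')')

-- ===== PRECONDITION & SPEC =====
def Spec_fix_unmatched_parentheses_both_sides (text : String) (out : String) : Prop := out = fix_unmatched_parentheses_both_sides_alt text
instance (text : String) (out : String) : Decidable (Spec_fix_unmatched_parentheses_both_sides text out) := by unfold Spec_fix_unmatched_parentheses_both_sides; infer_instance

-- ===== CLAIM (what is proved, stated in full; the proofs are below) =====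
def Claim_equal_fix_unmatched_parentheses_both_sides : Prop := ∀ (text : String), Dom_fix_unmatched_parentheses_both_sides text → Spec_fix_unmatched_parentheses_both_sides text (fix_unmatched_parentheses_both_sides text)

-- ===== LEMMAS AND PROOFS =====

-- non-paren characters do not affect A's fold
theorem foldA_filter : ∀ (l : List Char) (b m : Int),
    pvFoldA (l.filter (fun c => c = '(' || c = ')')) b m = pvFoldA l b m := by
  intro l
  induction l with
  | nil => intro b m; rfl
  | cons c t ih =>
    intro b m
    by_cases hL : c = '('
    · subst hL; simp [pvFoldA, ih]
    · by_cases hR : c = ')'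
      · subst hR; simp [pvFoldA, ih]
      · simp [pvFoldA, hL, hR, ih]

theorem pvFoldA_cons (c : Char) (t : List Char) (b m : Int) :
    pvFoldA (c :: t) b m =
      if c = '(' then pvFoldA t (b + 1) m
      else if c = ')' then (if b > 0 then pvFoldA t (b - 1) m else pvFoldA t b (m + 1))
      else pvFoldA t b m := rfl

-- removing one round of "()" pairs does not change A's fold (balance stays ≥ 0)
theorem foldA_remPairs : ∀ (l : List Char) (b m : Int), 0 ≤ b →
    pvFoldA (pvRemPairs l) b m = pvFoldA l b m := by
  intro l
  induction l using pvRemPairs.induct with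
  | case1 => intro b m _; rfl
  | case2 c => intro b m _; rfl
  | case3 c1 c2 t hp ih =>
    intro b m hb
    obtain ⟨h1, h2⟩ := hp
    subst h1; subst h2
    have hrw : pvRemPairs ('(' :: ')' :: t) = pvRemPairs t := by simp [pvRemPairs]
    have hstep : pvFoldA ('(' :: ')' :: t) b m = pvFoldA t b m := by
      rw [pvFoldA_cons, if_pos rfl, pvFoldA_cons]
      simp only [Char.reduceEq, if_false, if_true, if_pos (by omega : b + 1 > 0)]
      ring_nf
    rw [hrw, hstep]
    exact ih b m hb
  | case4 c1 c2 t hp ih =>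
    intro b m hb
    simp only [pvRemPairs, if_neg hp]
    rw [pvFoldA_cons, pvFoldA_cons]
    split_ifs <;> exact ih _ _ (by omega)

-- full reduction does not change A's fold
theorem foldA_reduce : ∀ (l : List Char) (b m : Int), 0 ≤ b →
    pvFoldA (pvReduce l) b m = pvFoldA l b m := by
  intro l
  induction l using pvReduce.induct with
  | case1 l h ih =>
    intro b m hb
    rw [pvReduce, dif_pos h, ih b m hb, foldA_remPairs l b m hb]
  | case2 l h =>
    intro b m _
    rw [pvReduce, dif_neg h]

theorem reduce_noPair : ∀ (l : List Char), pvHasPair (pvReduce l) = false := by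
  intro l
  induction l using pvReduce.induct with
  | case1 l h ih => rw [pvReduce, dif_pos h]; exact ih
  | case2 l h => rw [pvReduce, dif_neg h]; simpa using h

theorem mem_remPairs : ∀ (l : List Char) (c : Char), c ∈ pvRemPairs l → c ∈ l := by
  intro l
  induction l using pvRemPairs.induct with
  | case1 => intro c h; simpa [pvRemPairs] using h
  | case2 d => intro c h; simpa [pvRemPairs] using h
  | case3 c1 c2 t hp ih =>
    intro c h
    rw [pvRemPairs, if_pos hp] at h
    exact List.mem_cons_of_mem _ (List.mem_cons_of_mem _ (ih c h))
  | case4 c1 c2 t hp ih =>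
    intro c h
    rw [pvRemPairs, if_neg hp] at h
    rcases List.mem_cons.mp h with h1 | h1
    · exact h1 ▸ List.mem_cons_self
    · exact List.mem_cons_of_mem _ (ih c h1)

theorem mem_reduce : ∀ (l : List Char) (c : Char), c ∈ pvReduce l → c ∈ l := by
  intro l
  induction l using pvReduce.induct with
  | case1 l h ih =>
    intro c hc
    rw [pvReduce, dif_pos h] at hc
    exact mem_remPairs l c (ih c hc)
  | case2 l h =>
    intro c hc
    rwa [pvReduce, dif_neg h] at hc

-- an all-paren list with no adjacent "()" is ")"*a ++ "("*b
theorem canonical_form : ∀ (l : List Char), (∀ c ∈ l, c = '(' ∨ c = ')') →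
    pvHasPair l = false → ∃ a b, l = List.replicate a ')' ++ List.replicate b '(' := by
  intro l
  induction l with
  | nil => intro _ _; exact ⟨0, 0, rfl⟩
  | cons c t ih =>
    intro hmem hnp
    match t, hnp with
    | [], _ =>
      rcases hmem c List.mem_cons_self with h | h
      · exact ⟨0, 1, by simp [h]⟩
      · exact ⟨1, 0, by simp [h]⟩
    | c2 :: t', hnp =>
      simp only [pvHasPair, Bool.or_eq_false_iff, decide_eq_false_iff_not] at hnp
      obtain ⟨hpair, hrest⟩ := hnp
      obtain ⟨a, b, hab⟩ := ih (fun d hd => hmem d (List.mem_cons_of_mem _ hd)) hrest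
      rcases hmem c List.mem_cons_self with h | h
      · -- c = '(' : then c2 ≠ ')', so a = 0
        subst h
        have hc2 : c2 ≠ ')' := fun hc2 => hpair ⟨rfl, hc2⟩
        match a, hab with
        | 0, hab =>
          refine ⟨0, b + 1, ?_⟩
          simp only [List.replicate, List.nil_append] at hab ⊢
          rw [hab]
        | a' + 1, hab =>
          exfalso
          simp only [List.replicate, List.cons_append, List.cons.injEq] at hab
          exact hc2 hab.1
      · subst h
        exact ⟨a + 1, b, by simp [List.replicate, hab]⟩

theorem foldA_open : ∀ (b : Nat) (bal m : Int),
    pvFoldA (List.replicate b '(') bal m = (bal + b, m) := by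
  intro b
  induction b with
  | zero => intro bal m; simp [pvFoldA]
  | succ n ih =>
    intro bal m
    simp only [List.replicate, pvFoldA, Char.reduceEq, reduceIte, ih, Prod.mk.injEq]
    exact ⟨by push_cast; ring, trivial⟩

theorem foldA_close : ∀ (a : Nat) (m : Int) (rest : List Char),
    pvFoldA (List.replicate a ')' ++ rest) 0 m = pvFoldA rest 0 (m + a) := by
  intro a
  induction a with
  | zero => intro m rest; simp
  | succ n ih =>
    intro m rest
    simp only [List.replicate, List.cons_append, pvFoldA, Char.reduceEq, reduceIte]
    rw [if_neg (by omega : ¬ (0:Int) > 0), ih]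
    congr 1
    omega

-- ===== VERDICT (by name: the statement is the Claim_ definition above) =====
theorem fix_unmatched_parentheses_both_sides_spec : Claim_equal_fix_unmatched_parentheses_both_sides := by
  intro text _
  unfold Spec_fix_unmatched_parentheses_both_sides
  unfold fix_unmatched_parentheses_both_sides fix_unmatched_parentheses_both_sides_alt
  have hparen : ∀ c ∈ pvReduce (text.toList.filter (fun c => c = '(' || c = ')')),
      c = '(' ∨ c = ')' := by
    intro c hc
    have := mem_reduce _ c hc
    have := List.of_mem_filter this
    simpa using this
  obtain ⟨a, b, hab⟩ := canonical_form _ hparen (reduce_noPair _)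
  have hfold : pvFoldA text.toList 0 0 = ((b : Int), (a : Int)) := by
    rw [← foldA_filter, ← foldA_reduce _ 0 0 le_rfl, hab, foldA_close, foldA_open]
    simp
  have hcount1 : (pvReduce (text.toList.filter (fun c => c = '(' || c = ')'))).count ')' = a := by
    rw [hab]; simp [List.count_replicate]
  have hcount2 : (pvReduce (text.toList.filter (fun c => c = '(' || c = ')'))).count '(' = b := by
    rw [hab]; simp [List.count_replicate]
  by_cases he : text = ""
  · subst he
    rw [if_pos rfl]
    have h0 : pvReduce ([] : List Char) = [] := by rw [pvReduce, dif_neg]; simp [pvHasPair]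
    simp only [String.toList_empty, List.filter_nil, h0, List.count_nil, List.replicate_zero,
      List.nil_append, List.append_nil]
  · rw [if_neg he]
    simp only [hfold, hcount1, hcount2]
    by_cases ha : (a : Int) > 0
    · rw [if_pos ha]
      by_cases hb : (b : Int) > 0
      · rw [if_pos hb]
        simp [List.append_assoc]
      · rw [if_neg hb]
        have : b = 0 := by omega
        simp [this]
    · rw [if_neg ha]
      have ha0 : a = 0 := by omega
      by_cases hb : (b : Int) > 0
      · rw [if_pos hb]
        simp [ha0]
      · rw [if_neg hb]
        have : b = 0 := by omega
        simp [ha0, this]
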